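-- pv_equiv track=rewrite | github.com/haodiaodemingzi/netcom | backend/services/keke6_scraper.py | _params_to_query_string
-- ===== SOURCE A (Python) =====
-- def _params_to_query_string(params):
--     if not isinstance(params, dict):
--         return ''
--
--     order = ['os', 'appId', 'userChannel', 'userLevel']
--     parts = []
--     for k in order:
--         if k in params:
--             parts.append(f'{k}={params[k]}')
--     for k, v in params.items():
--         if k in order:
--             continue
--         parts.append(f'{k}={v}')
--     return '&'.join(parts)
-- ===== SOURCE B (Python) =====
-- def _params_to_query_string(params):
--     if not isinstance(params, dict):
--         return ''
--
--     order = ['os', 'appId', 'userChannel', 'userLevel']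
--     rank = {k: i for i, k in enumerate(order)}
--     keys = sorted(params, key=lambda k: rank.get(k, len(order)))
--     return '&'.join(f'{k}={params[k]}' for k in keys)
-- ===== Notes on version B (the rewrite author's own statement) =====
-- stated objective: idiomatic
-- what changed: Replaces A's two explicit passes (priority keys first, then the remaining items) by a rank dict plus one stable sort of the keys with rank.get(k, len(order)) as key, joined in a single generator expression.
import Mathlib
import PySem

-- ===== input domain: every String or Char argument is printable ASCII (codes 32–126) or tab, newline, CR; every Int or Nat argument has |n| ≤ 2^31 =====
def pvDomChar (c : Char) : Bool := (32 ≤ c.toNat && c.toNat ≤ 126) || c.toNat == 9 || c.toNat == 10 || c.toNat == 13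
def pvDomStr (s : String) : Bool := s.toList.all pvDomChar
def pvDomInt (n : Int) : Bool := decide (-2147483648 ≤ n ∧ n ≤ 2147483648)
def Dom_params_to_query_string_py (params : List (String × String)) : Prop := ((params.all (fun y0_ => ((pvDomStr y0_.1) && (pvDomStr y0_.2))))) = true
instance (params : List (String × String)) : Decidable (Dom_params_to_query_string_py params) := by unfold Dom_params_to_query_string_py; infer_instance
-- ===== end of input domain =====

-- B replaces A's two explicit passes (priority keys, then remaining items) by one stable
-- sort of the keys under a rank dict — more idiomatic, same results on dict-shaped inputs.


-- ===== PORT A =====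
def params_to_query_string_py (params : List (String × String)) : String :=
  let d := PySem.Dict.mk params
  let order : List String := ["os", "appId", "userChannel", "userLevel"]
  let parts : List String :=
    order.foldl (fun parts k =>
      if d.contains k then parts ++ [k ++ "=" ++ (d.get? k).getD ""] else parts) []
  let parts :=
    params.foldl (fun parts kv =>
      if kv.1 ∈ order then parts else parts ++ [kv.1 ++ "=" ++ kv.2]) parts
  PySem.Str.join "&" parts

-- ===== PORT B =====
def params_to_query_string_py_alt (params : List (String × String)) : String :=
  let order : List String := ["os", "appId", "userChannel", "userLevel"]
  let rank : PySem.Dict String Int :=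
    PySem.Dict.ofList ((PySem.List.enumerate order).map (fun ik => (ik.2, ik.1)))
  let keys : List String :=
    PySem.List.sorted (params.map Prod.fst)
      (fun k => rank.getD k (order.length : Int))
  PySem.Str.join "&"
    (keys.map (fun k => k ++ "=" ++ (((PySem.Dict.mk params).get? k).getD "")))

-- ===== PRECONDITION & SPEC =====
-- Pre_ requires pairwise-distinct keys: `params` ports a Python dict, which cannot hold
-- duplicate keys, so association lists with a repeated key represent no actual input of A.
def Pre_params_to_query_string_py (params : List (String × String)) : Prop :=
  (params.map Prod.fst).Nodup
instance (params : List (String × String)) : Decidable (Pre_params_to_query_string_py params) := by unfold Pre_params_to_query_string_py; infer_instance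
def pvWitness_params_to_query_string_py : (List (String × String)) :=
  [("os", "1"), ("foo", "bar"), ("appId", "7")]
def Spec_params_to_query_string_py (params : List (String × String)) (out : String) : Prop := out = params_to_query_string_py_alt params
instance (params : List (String × String)) (out : String) : Decidable (Spec_params_to_query_string_py params out) := by unfold Spec_params_to_query_string_py; infer_instance

-- ===== CLAIM (what is proved, stated in full; the proofs are below) =====
def Claim_equal_params_to_query_string_py : Prop := ∀ (params : List (String × String)), Dom_params_to_query_string_py params → Pre_params_to_query_string_py params → Spec_params_to_query_string_py params (params_to_query_string_py params)

-- ===== LEMMAS AND PROOFS =====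

-- the rank function B sorts by, written as a plain conditional
def pvRnk (k : String) : Int :=
  if k = "os" then 0 else if k = "appId" then 1 else if k = "userChannel" then 2
  else if k = "userLevel" then 3 else 4

theorem pvRank_getD (k : String) :
    (PySem.Dict.ofList ((PySem.List.enumerate
        ["os", "appId", "userChannel", "userLevel"]).map (fun ik => (ik.2, ik.1)))).getD k
        ((["os", "appId", "userChannel", "userLevel"] : List String).length : Int)
      = pvRnk k := by
  have h : (PySem.Dict.ofList ((PySem.List.enumerate
        ["os", "appId", "userChannel", "userLevel"]).map (fun ik => (ik.2, ik.1))))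
      = PySem.Dict.mk [("os", 0), ("appId", 1), ("userChannel", 2), ("userLevel", 3)] := by
    decide
  rw [h]
  simp only [PySem.Dict.getD, PySem.Dict.get?_mk_cons]
  by_cases h1 : k = "os"
  · subst h1; simp [pvRnk]
  have n1 : ("os" == k) = false := beq_eq_false_iff_ne.mpr (Ne.symm h1)
  by_cases h2 : k = "appId"
  · subst h2; simp [pvRnk, n1]
  have n2 : ("appId" == k) = false := beq_eq_false_iff_ne.mpr (Ne.symm h2)
  by_cases h3 : k = "userChannel"
  · subst h3; simp [pvRnk, n1, n2]
  have n3 : ("userChannel" == k) = false := beq_eq_false_iff_ne.mpr (Ne.symm h3)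
  by_cases h4 : k = "userLevel"
  · subst h4; simp [pvRnk, n1, n2, n3]
  have n4 : ("userLevel" == k) = false := beq_eq_false_iff_ne.mpr (Ne.symm h4)
  simp [pvRnk, n1, n2, n3, n4, h1, h2, h3, h4, PySem.Dict.get?]

theorem pvInsertBy_append {α : Type} (before : α → α → Bool) (x : α) (as bs : List α)
    (h : ∀ a ∈ as, before x a = false) :
    PySem.List.insertBy before x (as ++ bs) = as ++ PySem.List.insertBy before x bs := by
  induction as with
  | nil => rfl
  | cons a t ih =>
    simp only [List.cons_append, PySem.List.insertBy, h a (by simp)]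
    simp [ih (fun b hb => h b (by simp [hb]))]

theorem pvInsertBy_head {α : Type} (before : α → α → Bool) (x : α) (bs : List α)
    (h : ∀ b ∈ bs, before x b = true) :
    PySem.List.insertBy before x bs = x :: bs := by
  cases bs with
  | nil => rfl
  | cons b t => simp [PySem.List.insertBy, h b (by simp)]

theorem pvInsert_mid (x : String) (as bs : List String)
    (ha : ∀ a ∈ as, decide (pvRnk x < pvRnk a) = false)
    (hb : ∀ b ∈ bs, decide (pvRnk x < pvRnk b) = true) :
    PySem.List.insertBy (fun a b => decide (pvRnk a < pvRnk b)) x (as ++ bs)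
      = as ++ x :: bs := by
  rw [pvInsertBy_append _ _ _ _ ha, pvInsertBy_head _ _ _ hb]

-- stable-sort bucket decomposition for the five-valued rank key
theorem pvSorted_buckets (xs : List String) :
    PySem.List.sorted xs pvRnk =
      xs.filter (fun k => pvRnk k == 0) ++ xs.filter (fun k => pvRnk k == 1) ++
      xs.filter (fun k => pvRnk k == 2) ++ xs.filter (fun k => pvRnk k == 3) ++
      xs.filter (fun k => pvRnk k == 4) := by
  rw [PySem.List.sorted_eq_foldl_insertBy]
  induction xs using List.reverseRecOn with
  | nil => rfl
  | append_singleton ys x ih =>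
    rw [List.foldl_append, List.foldl_cons, List.foldl_nil, ih]
    simp only [List.filter_append, List.filter_cons, List.filter_nil]
    have hmem : ∀ (j : Int) (k : String),
        k ∈ ys.filter (fun k => pvRnk k == j) → pvRnk k = j := by
      intro j k hk
      simpa using (List.of_mem_filter hk)
    have hlow : ∀ (i : Int), i ≤ pvRnk x →
        ∀ a ∈ ys.filter (fun k => pvRnk k == i), decide (pvRnk x < pvRnk a) = false := by
      intro i hi a ha
      have := hmem i a ha
      simp only [this, decide_eq_false_iff_not]
      omega
    have hhigh : ∀ (i : Int), pvRnk x < i →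
        ∀ b ∈ ys.filter (fun k => pvRnk k == i), decide (pvRnk x < pvRnk b) = true := by
      intro i hi b hb
      have := hmem i b hb
      simp only [this, decide_eq_true_eq]
      omega
    have hrb : pvRnk x = 0 ∨ pvRnk x = 1 ∨ pvRnk x = 2 ∨ pvRnk x = 3 ∨ pvRnk x = 4 := by
      unfold pvRnk; split_ifs <;> simp
    simp only [List.append_assoc]
    rcases hrb with h | h | h | h | h
    · rw [pvInsert_mid x (ys.filter (fun k => pvRnk k == 0))
          (ys.filter (fun k => pvRnk k == 1) ++ (ys.filter (fun k => pvRnk k == 2) ++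
            (ys.filter (fun k => pvRnk k == 3) ++ ys.filter (fun k => pvRnk k == 4))))
          (fun a ha => hlow 0 (by omega) a ha)
          (by intro b hb
              rcases List.mem_append.mp hb with h1 | h1
              · exact hhigh 1 (by omega) b h1
              rcases List.mem_append.mp h1 with h2 | h2
              · exact hhigh 2 (by omega) b h2
              rcases List.mem_append.mp h2 with h3 | h3
              · exact hhigh 3 (by omega) b h3
              · exact hhigh 4 (by omega) b h3)]
      simp [h]
    · rw [show ys.filter (fun k => pvRnk k == 0) ++ (ys.filter (fun k => pvRnk k == 1) ++
            (ys.filter (fun k => pvRnk k == 2) ++ (ys.filter (fun k => pvRnk k == 3) ++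
              ys.filter (fun k => pvRnk k == 4))))
          = (ys.filter (fun k => pvRnk k == 0) ++ ys.filter (fun k => pvRnk k == 1)) ++
            (ys.filter (fun k => pvRnk k == 2) ++ (ys.filter (fun k => pvRnk k == 3) ++
              ys.filter (fun k => pvRnk k == 4))) from by simp [List.append_assoc]]
      rw [pvInsert_mid x _ _
          (by intro a ha
              rcases List.mem_append.mp ha with h1 | h1
              · exact hlow 0 (by omega) a h1
              · exact hlow 1 (by omega) a h1)
          (by intro b hb
              rcases List.mem_append.mp hb with h1 | h1
              · exact hhigh 2 (by omega) b h1
              rcases List.mem_append.mp h1 with h2 | h2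
              · exact hhigh 3 (by omega) b h2
              · exact hhigh 4 (by omega) b h2)]
      simp [h]
    · rw [show ys.filter (fun k => pvRnk k == 0) ++ (ys.filter (fun k => pvRnk k == 1) ++
            (ys.filter (fun k => pvRnk k == 2) ++ (ys.filter (fun k => pvRnk k == 3) ++
              ys.filter (fun k => pvRnk k == 4))))
          = (ys.filter (fun k => pvRnk k == 0) ++ (ys.filter (fun k => pvRnk k == 1) ++
              ys.filter (fun k => pvRnk k == 2))) ++
            (ys.filter (fun k => pvRnk k == 3) ++ ys.filter (fun k => pvRnk k == 4))
            from by simp [List.append_assoc]]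
      rw [pvInsert_mid x _ _
          (by intro a ha
              rcases List.mem_append.mp ha with h1 | h1
              · exact hlow 0 (by omega) a h1
              rcases List.mem_append.mp h1 with h2 | h2
              · exact hlow 1 (by omega) a h2
              · exact hlow 2 (by omega) a h2)
          (by intro b hb
              rcases List.mem_append.mp hb with h1 | h1
              · exact hhigh 3 (by omega) b h1
              · exact hhigh 4 (by omega) b h1)]
      simp [h]
    · rw [show ys.filter (fun k => pvRnk k == 0) ++ (ys.filter (fun k => pvRnk k == 1) ++
            (ys.filter (fun k => pvRnk k == 2) ++ (ys.filter (fun k => pvRnk k == 3) ++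
              ys.filter (fun k => pvRnk k == 4))))
          = (ys.filter (fun k => pvRnk k == 0) ++ (ys.filter (fun k => pvRnk k == 1) ++
              (ys.filter (fun k => pvRnk k == 2) ++ ys.filter (fun k => pvRnk k == 3)))) ++
            ys.filter (fun k => pvRnk k == 4)
            from by simp [List.append_assoc]]
      rw [pvInsert_mid x _ _
          (by intro a ha
              rcases List.mem_append.mp ha with h1 | h1
              · exact hlow 0 (by omega) a h1
              rcases List.mem_append.mp h1 with h2 | h2
              · exact hlow 1 (by omega) a h2
              rcases List.mem_append.mp h2 with h3 | h3
              · exact hlow 2 (by omega) a h3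
              · exact hlow 3 (by omega) a h3)
          (fun b hb => hhigh 4 (by omega) b hb)]
      simp [h]
    · rw [show ys.filter (fun k => pvRnk k == 0) ++ (ys.filter (fun k => pvRnk k == 1) ++
            (ys.filter (fun k => pvRnk k == 2) ++ (ys.filter (fun k => pvRnk k == 3) ++
              ys.filter (fun k => pvRnk k == 4))))
          = (ys.filter (fun k => pvRnk k == 0) ++ (ys.filter (fun k => pvRnk k == 1) ++
              (ys.filter (fun k => pvRnk k == 2) ++ (ys.filter (fun k => pvRnk k == 3) ++
                ys.filter (fun k => pvRnk k == 4))))) ++ []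
            from by simp]
      rw [pvInsert_mid x _ []
          (by intro a ha
              rcases List.mem_append.mp ha with h1 | h1
              · exact hlow 0 (by omega) a h1
              rcases List.mem_append.mp h1 with h2 | h2
              · exact hlow 1 (by omega) a h2
              rcases List.mem_append.mp h2 with h3 | h3
              · exact hlow 2 (by omega) a h3
              rcases List.mem_append.mp h3 with h4 | h4
              · exact hlow 3 (by omega) a h4
              · exact hlow 4 (by omega) a h4)
          (by intro b hb; simp at hb)]
      simp [h]

-- a nodup list filtered for equality with one value
theorem pvFilter_eq_single {α : Type} [DecidableEq α] (l : List α) (hnd : l.Nodup) (a : α) :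
    l.filter (fun x => x == a) = if a ∈ l then [a] else [] := by
  induction l with
  | nil => simp
  | cons x t ih =>
    rcases List.nodup_cons.mp hnd with ⟨hx, ht⟩
    by_cases hxa : x = a
    · subst hxa
      have hnil : List.filter (fun y => y == x) t = [] :=
        List.filter_eq_nil_iff.mpr (fun b hb hba => hx ((beq_iff_eq.mp hba) ▸ hb))
      simp [hnil]
    · simp [hxa, ih ht, Ne.symm hxa]

-- first-match lookup on a nodup association list
theorem pvGet_of_mem (params : List (String × String)) (k : String) (v : String)
    (hnd : (params.map Prod.fst).Nodup) (hm : (k, v) ∈ params) :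
    (PySem.Dict.mk params).get? k = some v := by
  induction params with
  | nil => simp at hm
  | cons p t ih =>
    rw [List.map_cons] at hnd
    rcases List.nodup_cons.mp hnd with ⟨hp, ht⟩
    rcases List.mem_cons.mp hm with h | h
    · subst h; simp [PySem.Dict.get?_mk_cons]
    · have hne : p.1 ≠ k := by
        intro he
        exact hp (by simpa [he] using List.mem_map_of_mem (f := Prod.fst) h)
      rw [PySem.Dict.get?_mk_cons, if_neg (by simp [hne])]
      exact ih ht h

-- 'if cond: skip else append' loop shape
theorem pvFoldl_skip_if {α β : Type} (q : α → Prop) [DecidablePred q] (f : α → β)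
    (l : List α) (acc : List β) :
    l.foldl (fun acc x => if q x then acc else acc ++ [f x]) acc
      = acc ++ (l.filter (fun x => ¬ q x)).map f := by
  induction l generalizing acc with
  | nil => simp
  | cons x t ih =>
    by_cases hq : q x <;> simp [hq, ih]

theorem pvContains_iff (params : List (String × String)) (k : String) :
    (PySem.Dict.mk params).contains k = decide (k ∈ params.map Prod.fst) := by
  rw [PySem.Dict.contains_mk]
  induction params with
  | nil => simp
  | cons p t ih =>
    by_cases h : p.1 = k
    · simp [List.any_cons, h]
    · simp [List.any_cons, ih, beq_eq_false_iff_ne.mpr h, Ne.symm h]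

-- ===== VERDICT (by name: the statement is the Claim_ definition above) =====
theorem params_to_query_string_py_spec : Claim_equal_params_to_query_string_py := by
  intro params _hdom hnd
  unfold Pre_params_to_query_string_py at hnd
  unfold Spec_params_to_query_string_py
  simp only [params_to_query_string_py, params_to_query_string_py_alt]
  congr 1
  -- B's sort key is pvRnk
  rw [show (fun k => (PySem.Dict.ofList ((PySem.List.enumerate
        ["os", "appId", "userChannel", "userLevel"]).map (fun ik => (ik.2, ik.1)))).getD k
        ((["os", "appId", "userChannel", "userLevel"] : List String).length : Int)) = pvRnk
      from funext pvRank_getD]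
  rw [pvSorted_buckets]
  simp only [List.map_append]
  -- A's second loop is append-of-filtered-map
  rw [pvFoldl_skip_if (fun kv : String × String => kv.1 ∈
        (["os", "appId", "userChannel", "userLevel"] : List String))
      (fun kv : String × String => kv.1 ++ "=" ++ kv.2) params]
  -- the four priority buckets are singletons (keys are nodup)
  rw [show (fun k => pvRnk k == (0 : Int)) = (fun k : String => k == "os") from
        by funext k; unfold pvRnk; split_ifs <;> simp_all,
      show (fun k => pvRnk k == (1 : Int)) = (fun k : String => k == "appId") from
        by funext k; unfold pvRnk; split_ifs <;> simp_all,
      show (fun k => pvRnk k == (2 : Int)) = (fun k : String => k == "userChannel") from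
        by funext k; unfold pvRnk; split_ifs <;> simp_all,
      show (fun k => pvRnk k == (3 : Int)) = (fun k : String => k == "userLevel") from
        by funext k; unfold pvRnk; split_ifs <;> simp_all]
  rw [pvFilter_eq_single _ hnd, pvFilter_eq_single _ hnd, pvFilter_eq_single _ hnd,
      pvFilter_eq_single _ hnd]
  -- the leftover bucket is the non-priority pairs, formatted from their own values
  have htail : ((params.map Prod.fst).filter (fun k => pvRnk k == (4 : Int))).map
        (fun k => k ++ "=" ++ (((PySem.Dict.mk params).get? k).getD ""))
      = (params.filter (fun kv => ¬ kv.1 ∈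
          (["os", "appId", "userChannel", "userLevel"] : List String))).map
          (fun kv => kv.1 ++ "=" ++ kv.2) := by
    rw [show (fun k => pvRnk k == (4 : Int)) = (fun k : String =>
          decide (¬ k ∈ (["os", "appId", "userChannel", "userLevel"] : List String))) from
        by funext k; unfold pvRnk; split_ifs <;> simp_all]
    rw [List.filter_map, List.map_map]
    refine List.map_congr_left ?_
    intro kv hkv
    have hm : kv ∈ params := List.mem_of_mem_filter hkv
    simp only [Function.comp]
    rw [pvGet_of_mem params kv.1 kv.2 hnd hm]
    rfl
  rw [htail]
  -- A's first loop: unfold the four literal iterations and split on the four memberships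
  simp only [List.foldl_cons, List.foldl_nil, pvContains_iff]
  by_cases c1 : "os" ∈ params.map Prod.fst <;>
    by_cases c2 : "appId" ∈ params.map Prod.fst <;>
    by_cases c3 : "userChannel" ∈ params.map Prod.fst <;>
    by_cases c4 : "userLevel" ∈ params.map Prod.fst <;>
    simp [c1, c2, c3, c4]
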